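-- pv_equiv track=rewrite | github.com/thanglq150188/libra-core | libra/utils/streaming.py | tokens_from
-- ===== SOURCE A (Python) =====
-- from typing import Dict, List
--
-- def tokens_from(text: str) -> List[str]: # type: ignore
--     tokens = text.split(' ')
--     output_tokens = []
--     for token in tokens:
--         output_tokens.append(token)
--         output_tokens.append(' ')
--     output_tokens = output_tokens[:-1]
--     return output_tokens
-- ===== SOURCE B (Python) =====
-- from typing import List
--
-- def tokens_from(text: str) -> List[str]:
--     tokens = []
--     cur = []
--     for ch in text:
--         if ch == ' ':
--             tokens.append(''.join(cur))
--             tokens.append(' ')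
--             cur = []
--         else:
--             cur.append(ch)
--     tokens.append(''.join(cur))
--     return tokens
-- ===== Notes on version B (the rewrite author's own statement) =====
-- stated objective: alternative
-- what changed: Replaces the split-into-pieces list, the interleave loop and the trailing truncation with a single character scan that emits each piece and its following separator token directly.
import Mathlib
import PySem

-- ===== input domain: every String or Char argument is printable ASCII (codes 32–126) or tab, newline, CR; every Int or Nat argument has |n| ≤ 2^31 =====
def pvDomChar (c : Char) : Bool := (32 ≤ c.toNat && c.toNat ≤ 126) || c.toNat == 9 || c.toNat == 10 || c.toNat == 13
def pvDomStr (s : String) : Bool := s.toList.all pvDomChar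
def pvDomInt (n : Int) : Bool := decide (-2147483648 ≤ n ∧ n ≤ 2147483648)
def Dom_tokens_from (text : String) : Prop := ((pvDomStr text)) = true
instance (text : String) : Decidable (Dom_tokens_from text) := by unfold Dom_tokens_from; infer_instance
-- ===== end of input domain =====

-- B replaces split-then-interleave-then-truncate with one direct character scan (alternative decomposition).

-- ===== PORT A =====
def tokens_from (text : String) : List String :=
  let tokens := (PySem.Str.split? text " ").getD []   -- sep is nonempty, so split? never returns none
  let output_tokens := tokens.foldl (fun acc token => (acc ++ [token]) ++ [" "]) []
  PySem.List.slice output_tokens none (some (-1))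

-- ===== PORT B =====
-- the loop of Source B as structural recursion over the same state (current piece `cur`)
def tokensGo : List Char → List Char → List String
  | [], cur => [String.ofList cur]
  | c :: rest, cur =>
      if c = ' ' then String.ofList cur :: " " :: tokensGo rest []
      else tokensGo rest (cur ++ [c])

def tokens_from_alt (text : String) : List String :=
  tokensGo text.toList []

-- ===== PRECONDITION & SPEC =====
def Spec_tokens_from (text : String) (out : List String) : Prop := out = tokens_from_alt text
instance (text : String) (out : List String) : Decidable (Spec_tokens_from text out) := by unfold Spec_tokens_from; infer_instance

-- ===== CLAIM (what is proved, stated in full; the proofs are below) =====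
def Claim_equal_tokens_from : Prop := ∀ (text : String), Dom_tokens_from text → Spec_tokens_from text (tokens_from text)

-- ===== LEMMAS AND PROOFS =====

-- simple specification of Python's split on a single-space separator
def mySplit : List Char → List (List Char)
  | [] => [[]]
  | c :: r =>
      if c = ' ' then [] :: mySplit r
      else match mySplit r with
        | [] => [[c]]
        | p :: ps => (c :: p) :: ps

lemma mySplit_ne_nil (l : List Char) : mySplit l ≠ [] := by
  cases l with
  | nil => simp [mySplit]
  | cons c r =>
    simp only [mySplit]
    split
    · simp
    · cases h : mySplit r <;> simp

def prependFirst (pre : List Char) : List (List Char) → List (List Char)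
  | [] => [pre]
  | p :: ps => (pre ++ p) :: ps

lemma prependFirst_nil (ps : List (List Char)) (h : ps ≠ []) : prependFirst [] ps = ps := by
  cases ps with
  | nil => exact absurd rfl h
  | cons p ps => simp [prependFirst]

-- the interleaved token list S(pieces): pieces joined by standalone " " tokens
def S : List (List Char) → List String
  | [] => []
  | [p] => [String.ofList p]
  | p :: q :: ps => String.ofList p :: " " :: S (q :: ps)

lemma go_eq (fuel : Nat) : ∀ (l cur : List Char) (acc : List (List Char)),
    l.length ≤ fuel →
    PySem.Chars.splitOn.go [' '] fuel l cur acc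
      = acc.reverse ++ prependFirst cur.reverse (mySplit l) := by
  induction fuel with
  | zero =>
    intro l cur acc h
    have : l = [] := List.eq_nil_of_length_eq_zero (Nat.le_zero.mp h)
    subst this
    simp [PySem.Chars.splitOn.go, mySplit, prependFirst]
  | succ fuel ih =>
    intro l cur acc h
    cases l with
    | nil => simp [PySem.Chars.splitOn.go, mySplit, prependFirst]
    | cons c rest =>
      by_cases hc : c = ' '
      · subst hc
        rw [PySem.Chars.splitOn.go]
        have hpre : ([' '] : List Char).isPrefixOf (' ' :: rest) = true := by
          simp [List.isPrefixOf]
        rw [hpre]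
        rw [show List.drop ([' '] : List Char).length (' ' :: rest) = rest by simp]
        rw [ih rest [] (List.reverse cur :: acc) (by simpa using Nat.le_of_succ_le_succ h)]
        simp only [List.reverse_cons, List.reverse_nil, mySplit]
        rw [prependFirst_nil _ (mySplit_ne_nil rest)]
        simp [prependFirst]
      · rw [PySem.Chars.splitOn.go]
        have hpre : ([' '] : List Char).isPrefixOf (c :: rest) = false := by
          simp [List.isPrefixOf]
          exact fun hh => absurd hh.symm hc
        rw [hpre]
        simp only [Bool.false_eq_true, if_false]
        rw [ih rest (c :: cur) acc (by simpa using Nat.le_of_succ_le_succ h)]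
        simp only [mySplit, if_neg hc, List.reverse_cons]
        cases hms : mySplit rest with
        | nil => exact absurd hms (mySplit_ne_nil rest)
        | cons p ps => simp [prependFirst]

lemma splitOn_space (l : List Char) : PySem.Chars.splitOn l [' '] = mySplit l := by
  rw [PySem.Chars.splitOn, go_eq (l.length + 1) l [] [] (Nat.le_succ _)]
  simpa using prependFirst_nil _ (mySplit_ne_nil l)

lemma tokensGo_eq (l : List Char) : ∀ cur,
    tokensGo l cur = S (prependFirst cur (mySplit l)) := by
  induction l with
  | nil => intro cur; simp [tokensGo, mySplit, prependFirst, S]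
  | cons c rest ih =>
    intro cur
    by_cases hc : c = ' '
    · subst hc
      simp only [tokensGo, mySplit]
      rw [ih [], prependFirst_nil _ (mySplit_ne_nil rest)]
      cases hms : mySplit rest with
      | nil => exact absurd hms (mySplit_ne_nil rest)
      | cons p ps => simp [prependFirst, S]
    · simp only [tokensGo, if_neg hc, mySplit]
      rw [ih (cur ++ [c])]
      cases hms : mySplit rest with
      | nil => exact absurd hms (mySplit_ne_nil rest)
      | cons p ps => simp [prependFirst]

lemma dropLast_flatMap (ps : List (List Char)) (h : ps ≠ []) :
    (List.flatMap (fun t => [t, " "]) (ps.map String.ofList)).dropLast = S ps := by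
  induction ps with
  | nil => exact absurd rfl h
  | cons p ps ih =>
    cases ps with
    | nil => simp [S]
    | cons q qs =>
      rw [show List.flatMap (fun t => [t, " "]) ((p :: q :: qs).map String.ofList)
            = [String.ofList p, " "] ++ List.flatMap (fun t => [t, " "]) ((q :: qs).map String.ofList) by simp]
      rw [List.dropLast_append_of_ne_nil (by simp), ih (by simp)]
      simp [S]

-- ===== VERDICT (by name: the statement is the Claim_ definition above) =====
theorem tokens_from_spec : Claim_equal_tokens_from := by
  intro text _
  unfold Spec_tokens_from tokens_from tokens_from_alt
  rw [tokensGo_eq _ [], prependFirst_nil _ (mySplit_ne_nil _)]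
  have hsplit : (PySem.Str.split? text " ").getD []
      = (mySplit text.toList).map String.ofList := by
    simp [PySem.Str.split?, PySem.Chars.split?, splitOn_space]
  simp only [hsplit]
  rw [show (fun (acc : List String) (token : String) => (acc ++ [token]) ++ [" "])
        = (fun acc token => acc ++ ([token] ++ [" "])) by funext acc t; simp]
  rw [PySem.List.foldl_append_eq_flatMap (fun t => [t] ++ [" "]) _ []]
  rw [PySem.List.slice_to_neg_one]
  simpa using dropLast_flatMap _ (mySplit_ne_nil text.toList)
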